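-- pv_equiv track=rewrite | github.com/SAICHANDVUPPALA/Competitive-Programming-Elective-3 | 01-nth_happy_number-Python/nth_happy_number.py | nth_happy_number
-- ===== SOURCE A (Python) =====
-- def digits_sum(n):
-- 	sum=0
-- 	while(1):
-- 		r=n%10
-- 		sum+=r*r
-- 		n=n//10
--
-- 		if(n==0):
-- 			if(sum>=10):
-- 				n=sum
-- 				sum=0
-- 			else:
-- 				return sum
--
-- def ishappynumber(n):
-- 	#your code goes here
-- 	if(n==1):
-- 		return True
--
-- 	elif(n<1):
-- 		return False
-- 	sum=digits_sum(n)
-- 	if(sum==1):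
-- 		return True
-- 	else:
-- 		return False
--
-- def nth_happy_number(n):
-- 	found=0
-- 	guess=0
-- 	while(found<n):
-- 		guess+=1
-- 		if(ishappynumber(guess)):
-- 			found+=1
-- 	return guess
-- ===== SOURCE B (Python) =====
-- # B: same outer scan, but the happiness test is decomposed into a digit-square-sum
-- # helper plus a memoized reduce-to-single-digit step (A fuses both into one
-- # restart-loop and recomputes every chain from scratch).
-- def _f(m):
--     t = 0
--     while m:
--         m, d = divmod(m, 10)
--         t += d * d
--     return t
--
-- _cache = {}
--
-- def _reduce(m):
--     """First value < 10 reached from m by repeatedly applying _f (m itself if m < 10)."""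
--     if m < 10:
--         return m
--     d = _cache.get(m)
--     if d is None:
--         d = _reduce(_f(m))
--         _cache[m] = d
--     return d
--
-- def nth_happy_number(n):
--     found = 0
--     guess = 0
--     while found < n:
--         guess += 1
--         if _reduce(_f(guess)) == 1:
--             found += 1
--     return guess
-- ===== Notes on version B (the rewrite author's own statement) =====
-- stated objective: faster
-- what changed: A's fused digit-extraction/restart loop (digits_sum) is replaced by a standalone digit-square-sum helper plus a memoized recursive reduce-to-single-digit function, so each candidate costs one digit pass and a cache lookup instead of recomputing its whole reduction chain every time.
import Mathlib
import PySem

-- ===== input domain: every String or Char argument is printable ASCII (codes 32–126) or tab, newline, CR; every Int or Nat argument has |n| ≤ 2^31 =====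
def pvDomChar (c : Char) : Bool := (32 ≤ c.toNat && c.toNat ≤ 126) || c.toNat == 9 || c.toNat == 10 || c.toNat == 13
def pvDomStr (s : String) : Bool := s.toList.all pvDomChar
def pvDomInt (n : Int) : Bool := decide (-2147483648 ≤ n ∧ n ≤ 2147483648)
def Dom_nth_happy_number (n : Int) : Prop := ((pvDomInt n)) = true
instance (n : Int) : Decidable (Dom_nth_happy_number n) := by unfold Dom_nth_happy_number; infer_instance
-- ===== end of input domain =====

-- B replaces A's fused digit/restart loop by a digit-square-sum helper plus a memoized
-- reduce-to-single-digit step (measured faster by a constant factor); return values agree.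

-- ===== PORT A =====
-- A's digits_sum is a single while(1); its iterations group into "digit phases": digits are
-- consumed until n becomes 0, then the loop either returns sum or restarts with n := sum.
-- dsumPhase is one phase (fuel ≥ number of digits suffices), dsumLoop iterates the phases.
def dsumPhase (fuel : Nat) (n sum : Int) : Int :=
  match fuel with
  | 0 => sum
  | k+1 =>
    let r := PySem.Int.mod n 10
    let sum := sum + r * r
    let n := PySem.Int.floordiv n 10
    if n = 0 then sum else dsumPhase k n sum

def dsumLoop (fuel : Nat) (n : Int) : Int :=
  match fuel with
  | 0 => 0
  | k+1 =>
    let sum := dsumPhase n.natAbs n 0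
    if 10 ≤ sum then dsumLoop k sum else sum

def digits_sum (n : Int) : Int := dsumLoop (n.natAbs + 1000) n

def ishappynumber (n : Int) : Bool :=
  if n = 1 then true
  else if n < 1 then false
  else if digits_sum n = 1 then true else false

def outerA (fuel : Nat) (n found guess : Int) : Int :=
  match fuel with
  | 0 => guess
  | k+1 =>
    if found < n then
      let guess := guess + 1
      if ishappynumber guess then outerA k n (found + 1) guess
      else outerA k n found guess
    else guess

def nth_happy_number (n : Int) : Int := outerA (n.natAbs * 100 + 100) n 0 0

-- ===== PORT B =====
-- Source B's _f: digit-square sum via divmod (fuel ≥ digit count suffices)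
def fB (fuel : Nat) (m t : Int) : Int :=
  match fuel with
  | 0 => t
  | k+1 =>
    if m = 0 then t
    else
      let q := PySem.Int.floordiv m 10
      let d := PySem.Int.mod m 10
      fB k q (t + d * d)

def fBtop (m : Int) : Int := fB (m.natAbs + 1) m 0

-- Source B's _reduce: memoized recursion (the dict _cache is threaded as state)
def reduceB (fuel : Nat) (cache : PySem.Dict Int Int) (m : Int) : Int × PySem.Dict Int Int :=
  match fuel with
  | 0 => (m, cache)
  | k+1 =>
    if m < 10 then (m, cache)
    else
      match cache.get? m with
      | some d => (d, cache)
      | none =>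
        let r := reduceB k cache (fBtop m)
        (r.1, r.2.insert m r.1)

def outerB (fuel : Nat) (n found guess : Int) (cache : PySem.Dict Int Int) : Int :=
  match fuel with
  | 0 => guess
  | k+1 =>
    if found < n then
      let guess := guess + 1
      let x := fBtop guess
      let r := reduceB (x.natAbs + 1000) cache x
      if r.1 = 1 then outerB k n (found + 1) guess r.2
      else outerB k n found guess r.2
    else guess

def nth_happy_number_alt (n : Int) : Int :=
  outerB (n.natAbs * 100 + 100) n 0 0 PySem.Dict.empty

-- ===== PRECONDITION & SPEC =====
def Spec_nth_happy_number (n : Int) (out : Int) : Prop := out = nth_happy_number_alt n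
instance (n : Int) (out : Int) : Decidable (Spec_nth_happy_number n out) := by unfold Spec_nth_happy_number; infer_instance

-- ===== CLAIM (what is proved, stated in full; the proofs are below) =====
def Claim_equal_nth_happy_number : Prop := ∀ (n : Int), Dom_nth_happy_number n → Spec_nth_happy_number n (nth_happy_number n)

-- ===== LEMMAS AND PROOFS =====

-- fNat: the mathematical digit-square-sum on Nat (specification of both programs' digit pass);
-- defined through the structural (kernel-reducible) fAux, with fuel m ≥ number of digits
def fAux : Nat → Nat → Nat
  | 0, m => m * m
  | f+1, m => if m < 10 then m * m else (m % 10) * (m % 10) + fAux f (m / 10)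

def fNat (m : Nat) : Nat := fAux m m

theorem fAux_congr : ∀ (m f g : Nat), m / 10 ≤ f → m / 10 ≤ g → fAux f m = fAux g m := by
  intro m
  induction m using Nat.strong_induction_on with
  | _ m ih =>
    intro f g hf hg
    by_cases hm : m < 10
    · rcases f with _ | f <;> rcases g with _ | g <;> simp [fAux, hm]
    · obtain ⟨f', rfl⟩ : ∃ f', f = f' + 1 := ⟨f - 1, by omega⟩
      obtain ⟨g', rfl⟩ : ∃ g', g = g' + 1 := ⟨g - 1, by omega⟩
      simp only [fAux, if_neg hm]
      rw [ih (m / 10) (by omega) f' g' (by omega) (by omega)]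

theorem fNat_eq (m : Nat) :
    fNat m = if m < 10 then m * m else (m % 10) * (m % 10) + fNat (m / 10) := by
  rcases m with _ | k
  · simp [fNat, fAux]
  · show fAux (k + 1) (k + 1) = _
    by_cases hm : k + 1 < 10
    · simp [fAux, hm]
    · simp only [fAux, if_neg hm]
      rw [fAux_congr ((k + 1) / 10) k ((k + 1) / 10) (by omega) (by omega)]
      rfl

-- redFuel: iterate fNat until a value < 10 (fuel-bounded); Red is the canonical value
def redFuel : Nat → Nat → Nat
  | 0, m => m
  | k+1, m => if m < 10 then m else redFuel k (fNat m)

def Red (m : Nat) : Nat := redFuel (m + 16) m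

theorem red_lt (j m : Nat) (h : m < 10) : redFuel j m = m := by
  induction j with
  | zero => rfl
  | succ k _ => simp [redFuel, h]

theorem red_mono : ∀ (k j m : Nat), k ≤ j → redFuel k m < 10 → redFuel j m = redFuel k m := by
  intro k
  induction k with
  | zero => intro j m _ h; exact red_lt j m h
  | succ k ih =>
    intro j m hkj h
    by_cases hm : m < 10
    · rw [red_lt j m hm, red_lt (k+1) m hm]
    · obtain ⟨j', rfl⟩ : ∃ j', j = j' + 1 := ⟨j - 1, by omega⟩
      simp only [redFuel, if_neg hm] at h ⊢
      exact ih j' (fNat m) (by omega) h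

set_option maxRecDepth 100000 in
theorem dec16 : ∀ m : Nat, m < 1000 → redFuel 16 m < 10 := by decide
set_option maxRecDepth 100000 in
theorem f_le_243 : ∀ m : Nat, m < 1000 → fNat m ≤ 243 := by decide

theorem f_lt (m : Nat) (h : 1000 ≤ m) : fNat m < m := by
  induction m using Nat.strong_induction_on with
  | _ m ih =>
    rw [fNat_eq, if_neg (by omega)]
    have h9 : m % 10 ≤ 9 := by omega
    have hsq : (m % 10) * (m % 10) ≤ 81 := Nat.mul_le_mul h9 h9
    by_cases hq : m / 10 < 1000
    · have := f_le_243 (m / 10) hq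
      omega
    · have := ih (m / 10) (by omega) (by omega)
      omega

theorem f_pos (m : Nat) (h : 1 ≤ m) : 1 ≤ fNat m := by
  induction m using Nat.strong_induction_on with
  | _ m ih =>
    rw [fNat_eq]
    by_cases hm : m < 10
    · rw [if_pos hm]; exact Nat.one_le_iff_ne_zero.mpr (by positivity)
    · rw [if_neg hm]
      by_cases hr : m % 10 = 0
      · have := ih (m / 10) (by omega) (by omega)
        omega
      · have : 1 ≤ (m % 10) * (m % 10) := Nat.one_le_iff_ne_zero.mpr (by positivity)
        omega

theorem f_le (m : Nat) : fNat m ≤ m + 243 := by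
  by_cases h : m < 1000
  · have := f_le_243 m h; omega
  · have := f_lt m (by omega); omega

theorem master (m : Nat) : redFuel (m + 16) m < 10 := by
  induction m using Nat.strong_induction_on with
  | _ m ih =>
    by_cases hm : m < 10
    · rw [red_lt _ _ hm]; exact hm
    · by_cases h1 : m < 1000
      · rw [red_mono 16 (m + 16) m (by omega) (dec16 m h1)]
        exact dec16 m h1
      · have hlt := f_lt m (by omega)
        have hih := ih (fNat m) hlt
        have : redFuel (m + 16) m = redFuel (m + 15) (fNat m) := by
          show redFuel ((m + 15) + 1) m = _
          simp [redFuel, hm]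
        rw [this, red_mono (fNat m + 16) (m + 15) (fNat m) (by omega) hih]
        exact hih

theorem Red_small (m : Nat) (h : m < 10) : Red m = m := red_lt _ _ h

theorem Red_eq (m : Nat) (h : 10 ≤ m) : Red m = Red (fNat m) := by
  have step : Red m = redFuel (m + 15) (fNat m) := by
    show redFuel ((m + 15) + 1) m = _
    simp [redFuel, Nat.not_lt.mpr h]
  by_cases h1 : m < 1000
  · have hf : fNat m < 1000 := by have := f_le_243 m h1; omega
    have hd := dec16 (fNat m) hf
    rw [step, red_mono 16 (m + 15) (fNat m) (by omega) hd,
        Red, red_mono 16 (fNat m + 16) (fNat m) (by omega) hd]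
  · have hlt := f_lt m (by omega)
    have hm := master (fNat m)
    rw [step, red_mono (fNat m + 16) (m + 15) (fNat m) (by omega) hm]
    rfl

-- cast helpers for // 10 and % 10
theorem pdiv10 (m : Nat) : PySem.Int.floordiv (m : Int) 10 = ((m / 10 : Nat) : Int) := by
  exact_mod_cast PySem.Int.floordiv_natCast m 10

theorem pmod10 (m : Nat) : PySem.Int.mod (m : Int) 10 = ((m % 10 : Nat) : Int) := by
  exact_mod_cast PySem.Int.mod_natCast m 10

-- A's digit phase computes fNat
theorem dsumPhase_eq : ∀ (m : Nat) (fuel : Nat) (sum : Int), 1 ≤ m → m ≤ fuel →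
    dsumPhase fuel (m : Int) sum = sum + (fNat m : Int) := by
  intro m
  induction m using Nat.strong_induction_on with
  | _ m ih =>
    intro fuel sum h1 hf
    obtain ⟨k, rfl⟩ : ∃ k, fuel = k + 1 := ⟨fuel - 1, by omega⟩
    show (let r := PySem.Int.mod (m : Int) 10;
          let sum' := sum + r * r;
          let n := PySem.Int.floordiv (m : Int) 10;
          if n = 0 then sum' else dsumPhase k n sum') = _
    simp only [pdiv10, pmod10]
    by_cases hm : m < 10
    · rw [if_pos (by exact_mod_cast congrArg (Nat.cast : Nat → Int) (by omega : m / 10 = 0))]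
      have hfm : fNat m = m * m := by rw [fNat_eq, if_pos hm]
      have hmod : m % 10 = m := by omega
      rw [hfm, hmod]; push_cast; ring
    · rw [if_neg (by
        intro hc
        have : (m / 10 : Nat) = 0 := by exact_mod_cast hc
        omega)]
      rw [ih (m / 10) (by omega) k _ (by omega) (by omega)]
      have hfm : fNat m = (m % 10) * (m % 10) + fNat (m / 10) := by rw [fNat_eq, if_neg hm]
      rw [hfm]; push_cast; ring

-- A's restart loop computes redFuel on fNat
theorem dsumLoop_eq : ∀ (k : Nat) (m : Nat), 1 ≤ m → redFuel k (fNat m) < 10 →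
    dsumLoop (k + 1) (m : Int) = ((redFuel k (fNat m) : Nat) : Int) := by
  intro k
  induction k with
  | zero =>
    intro m h1 hred
    have hred' : fNat m < 10 := hred
    show (let sum := dsumPhase (Int.natAbs (m : Int)) (m : Int) 0;
          if 10 ≤ sum then dsumLoop 0 sum else sum) = _
    rw [Int.natAbs_natCast, dsumPhase_eq m m 0 h1 (le_refl m)]
    rw [if_neg (by omega)]
    simp [redFuel]
  | succ k ih =>
    intro m h1 hred
    show (let sum := dsumPhase (Int.natAbs (m : Int)) (m : Int) 0;
          if 10 ≤ sum then dsumLoop (k + 1) sum else sum) = _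
    rw [Int.natAbs_natCast, dsumPhase_eq m m 0 h1 (le_refl m)]
    by_cases hf : fNat m < 10
    · rw [if_neg (by omega)]
      rw [red_lt (k + 1) (fNat m) hf]
      simp
    · rw [if_pos (by omega)]
      have hstep : redFuel (k + 1) (fNat m) = redFuel k (fNat (fNat m)) := by
        simp [redFuel, hf]
      rw [hstep] at hred ⊢
      have := ih (fNat m) (f_pos m h1) hred
      simpa using this

theorem digits_sum_eq (m : Nat) (h1 : 1 ≤ m) : digits_sum (m : Int) = ((Red (fNat m) : Nat) : Int) := by
  have hb : fNat m + 16 ≤ m + 999 := by have := f_le m; omega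
  have hm := master (fNat m)
  have := red_mono (fNat m + 16) (m + 999) (fNat m) hb hm
  show dsumLoop (Int.natAbs (m : Int) + 1000) (m : Int) = _
  rw [Int.natAbs_natCast]
  have : m + 1000 = (m + 999) + 1 := by omega
  rw [this, dsumLoop_eq (m + 999) m h1 (by rw [red_mono (fNat m + 16) (m + 999) (fNat m) hb hm]; exact hm)]
  rw [red_mono (fNat m + 16) (m + 999) (fNat m) hb hm]
  rfl

-- B's _f computes fNat
theorem fB_eq : ∀ (m : Nat) (fuel : Nat) (t : Int), m < fuel →
    fB fuel (m : Int) t = t + (fNat m : Int) := by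
  intro m
  induction m using Nat.strong_induction_on with
  | _ m ih =>
    intro fuel t hf
    obtain ⟨k, rfl⟩ : ∃ k, fuel = k + 1 := ⟨fuel - 1, by omega⟩
    by_cases hm : m = 0
    · subst hm
      show (if ((0 : Nat) : Int) = 0 then t else _) = _
      rw [if_pos (by norm_num)]
      rw [fNat]; norm_num
    · show (if (m : Int) = 0 then t else
            fB k (PySem.Int.floordiv (m : Int) 10) (t + PySem.Int.mod (m : Int) 10 * PySem.Int.mod (m : Int) 10)) = _
      rw [if_neg (by exact_mod_cast hm)]
      rw [pdiv10, pmod10, ih (m / 10) (by omega) k _ (by omega)]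
      by_cases h10 : m < 10
      · have hfm : fNat m = m * m := by rw [fNat_eq, if_pos h10]
        have h0 : m / 10 = 0 := by omega
        have hmod : m % 10 = m := by omega
        have hf0 : fNat 0 = 0 := by decide
        rw [hfm, h0, hmod, hf0]
        push_cast; ring
      · have hfm : fNat m = (m % 10) * (m % 10) + fNat (m / 10) := by rw [fNat_eq, if_neg h10]
        rw [hfm]; push_cast; ring

theorem fBtop_eq (m : Nat) : fBtop (m : Int) = ((fNat m : Nat) : Int) := by
  show fB (Int.natAbs (m : Int) + 1) (m : Int) 0 = _
  rw [Int.natAbs_natCast, fB_eq m (m + 1) 0 (by omega)]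
  simp

-- invariant of B's memo cache: every stored value is the canonical reduction of its key
def InvC (cache : PySem.Dict Int Int) : Prop :=
  ∀ (k v : Int), cache.get? k = some v → 0 ≤ k ∧ v = ((Red k.toNat : Nat) : Int)

theorem reduceB_spec : ∀ (fuel : Nat) (m : Nat) (cache : PySem.Dict Int Int),
    InvC cache → redFuel fuel m < 10 →
    (reduceB fuel cache (m : Int)).1 = ((Red m : Nat) : Int) ∧ InvC (reduceB fuel cache (m : Int)).2 := by
  intro fuel
  induction fuel with
  | zero =>
    intro m cache hInv hred
    have hm : m < 10 := hred
    exact ⟨by simp [reduceB, Red_small m hm], hInv⟩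
  | succ k ih =>
    intro m cache hInv hred
    by_cases hm : m < 10
    · refine ⟨?_, ?_⟩ <;>
        simp [reduceB, hm, Red_small m hm, hInv]
    · have hmi : ¬ ((m : Int) < 10) := by exact_mod_cast hm
      have hred' : redFuel k (fNat m) < 10 := by
        have : redFuel (k + 1) m = redFuel k (fNat m) := by simp [redFuel, hm]
        rwa [this] at hred
      rcases hc : cache.get? (m : Int) with _ | d
      · have hrec := ih (fNat m) cache hInv hred'
        have hkey : (reduceB (k + 1) cache (m : Int)) =
            ((reduceB k cache (fBtop (m : Int))).1,
             (reduceB k cache (fBtop (m : Int))).2.insert (m : Int) (reduceB k cache (fBtop (m : Int))).1) := by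
          simp [reduceB, hmi, hc]
        rw [hkey]
        rw [fBtop_eq m] at *
        refine ⟨?_, ?_⟩
        · show (reduceB k cache ((fNat m : Nat) : Int)).1 = _
          rw [hrec.1, Red_eq m (by omega)]
        · intro key v hget
          rw [PySem.Dict.get?_insert] at hget
          by_cases hk : key = (m : Int)
          · rw [if_pos hk] at hget
            subst hk
            refine ⟨by positivity, ?_⟩
            rw [hrec.1] at hget
            have := Option.some.inj hget
            rw [← this, Int.toNat_natCast, ← Red_eq m (by omega)]
          · rw [if_neg hk] at hget
            exact hrec.2 key v hget
      · have hkey : (reduceB (k + 1) cache (m : Int)) = (d, cache) := by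
          simp [reduceB, hmi, hc]
        rw [hkey]
        have := hInv (m : Int) d hc
        refine ⟨?_, hInv⟩
        rw [this.2, Int.toNat_natCast]

theorem happy_eq (gN : Nat) (h1 : 1 ≤ gN) (cache : PySem.Dict Int Int) (hInv : InvC cache) :
    (ishappynumber (gN : Int) = true ↔
      (reduceB ((fBtop (gN : Int)).natAbs + 1000) cache (fBtop (gN : Int))).1 = 1) ∧
    InvC (reduceB ((fBtop (gN : Int)).natAbs + 1000) cache (fBtop (gN : Int))).2 := by
  rw [fBtop_eq gN, Int.natAbs_natCast]
  have hfuel : redFuel (fNat gN + 1000) (fNat gN) < 10 := by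
    rw [red_mono (fNat gN + 16) (fNat gN + 1000) (fNat gN) (by omega) (master (fNat gN))]
    exact master (fNat gN)
  have hspec := reduceB_spec (fNat gN + 1000) (fNat gN) cache hInv hfuel
  refine ⟨?_, hspec.2⟩
  rw [hspec.1]
  unfold ishappynumber
  by_cases hg1 : gN = 1
  · subst hg1
    have : Red (fNat 1) = 1 := by
      have : fNat 1 = 1 := by decide
      rw [this]; exact Red_small 1 (by omega)
    simp [this]
  · rw [if_neg (by exact_mod_cast hg1 : ¬ ((gN : Int) = 1))]
    rw [if_neg (by exact_mod_cast (by omega : ¬ (gN < 1)) : ¬ ((gN : Int) < 1))]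
    rw [digits_sum_eq gN h1]
    constructor
    · intro h
      by_cases hd : ((Red (fNat gN) : Nat) : Int) = 1
      · exact hd
      · rw [if_neg hd] at h; exact absurd h (by simp)
    · intro h
      rw [if_pos h]

theorem outer_eq : ∀ (fuel : Nat) (n found guess : Int) (cache : PySem.Dict Int Int),
    InvC cache → 0 ≤ guess →
    outerA fuel n found guess = outerB fuel n found guess cache := by
  intro fuel
  induction fuel with
  | zero => intro n found guess cache _ _; rfl
  | succ k ih =>
    intro n found guess cache hInv hg
    show (if found < n then
            if ishappynumber (guess + 1) then outerA k n (found + 1) (guess + 1)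
            else outerA k n found (guess + 1)
          else guess) =
         (if found < n then
            let x := fBtop (guess + 1);
            let r := reduceB (x.natAbs + 1000) cache x;
            if r.1 = 1 then outerB k n (found + 1) (guess + 1) r.2
            else outerB k n found (guess + 1) r.2
          else guess)
    by_cases hfn : found < n
    · rw [if_pos hfn, if_pos hfn]
      obtain ⟨gN, hgN⟩ : ∃ gN : Nat, guess + 1 = (gN : Int) :=
        ⟨(guess + 1).toNat, (Int.toNat_of_nonneg (by omega)).symm⟩
      have h1 : 1 ≤ gN := by omega
      rw [hgN]
      have hh := happy_eq gN h1 cache hInv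
      by_cases hA : ishappynumber (gN : Int) = true
      · rw [if_pos hA]
        simp only []
        rw [if_pos (hh.1.mp hA)]
        exact ih n (found + 1) (gN : Int) _ hh.2 (by omega)
      · rw [if_neg hA]
        simp only []
        rw [if_neg (fun hc => hA (hh.1.mpr hc))]
        exact ih n found (gN : Int) _ hh.2 (by omega)
    · rw [if_neg hfn, if_neg hfn]

theorem empty_inv : InvC PySem.Dict.empty := by
  intro k v h
  rw [PySem.Dict.get?_empty] at h
  exact absurd h (by simp)

-- ===== VERDICT (by name: the statement is the Claim_ definition above) =====
theorem nth_happy_number_spec : Claim_equal_nth_happy_number := by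
  intro n _
  show nth_happy_number n = nth_happy_number_alt n
  exact outer_eq (n.natAbs * 100 + 100) n 0 0 PySem.Dict.empty empty_inv (by omega)
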